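-- pv_equiv track=rewrite | github.com/yamashita-tiemi/seguranca-sistemas | Feistel.py | _f_function
-- ===== SOURCE A (Python) =====
-- def _f_function(right_half, subkey):
--     """
--     Função F da estrutura Feistel
--     Implementação simples: XOR com expansão e substituição básica
--     """
--     # Expansão: duplica alguns bits para criar confusão
--     expanded = ((right_half << 1) | (right_half >> 31)) & 0xFFFFFFFF
--
--     # XOR com a subchave
--     xor_result = expanded ^ subkey
--
--     # Substituição simples (S-box básica)
--     substituted = 0
--     for i in range(8):
--         # Pega 4 bits por vez
--         nibble = (xor_result >> (i * 4)) & 0xF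
--         # Substituição simples: inversão dos bits + XOR
--         new_nibble = ((~nibble) ^ 0x5) & 0xF
--         substituted |= (new_nibble << (i * 4))
--
--     # Permutação final
--     permuted = ((substituted << 7) | (substituted >> 25)) & 0xFFFFFFFF
--
--     return permuted
-- ===== SOURCE B (Python) =====
-- def _f_function(right_half, subkey):
--     """Feistel F-function rewritten as two applications of one parametrized
--     32-bit rotate-and-mask helper around a single merged XOR: the per-nibble
--     S-box loop collapses to XOR with 0xAAAAAAAA (((~n)^0x5)&0xF == n^0xA)."""
--     def rot(x, l):
--         return ((x << l) | (x >> (32 - l))) & 0xFFFFFFFF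
--     return rot((rot(right_half, 1) ^ subkey ^ 0xAAAAAAAA) & 0xFFFFFFFF, 7)
-- ===== Notes on version B (the rewrite author's own statement) =====
-- stated objective: simpler
-- what changed: B is a single expression built from one parametrized rotate-and-mask helper applied twice; the 8-iteration per-nibble S-box loop disappears into a merged word-level XOR with subkey and 0xAAAAAAAA, since ((~nib)^0x5)&0xF equals nib^0xA for every nibble.
import Mathlib
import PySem

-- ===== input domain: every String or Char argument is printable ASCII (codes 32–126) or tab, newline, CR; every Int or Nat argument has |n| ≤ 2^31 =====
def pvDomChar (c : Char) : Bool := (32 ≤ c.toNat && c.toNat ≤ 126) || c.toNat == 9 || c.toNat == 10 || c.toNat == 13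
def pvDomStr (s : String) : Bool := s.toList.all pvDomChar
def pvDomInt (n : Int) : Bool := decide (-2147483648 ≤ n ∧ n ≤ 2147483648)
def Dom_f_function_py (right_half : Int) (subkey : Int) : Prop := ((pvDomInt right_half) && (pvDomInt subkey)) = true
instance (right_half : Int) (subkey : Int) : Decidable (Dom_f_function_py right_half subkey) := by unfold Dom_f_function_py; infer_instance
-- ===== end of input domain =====

-- B replaces A's 8-iteration per-nibble S-box loop and staged locals by one expression:
-- a parametrized rotate-and-mask helper applied twice around a merged XOR with
-- subkey and 0xAAAAAAAA (objective: simpler).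


-- ===== PORT A =====
def f_function_py (right_half : Int) (subkey : Int) : Int :=
  let expanded := PySem.Int.band (PySem.Int.bor (right_half <<< (1:Nat)) (right_half >>> (31:Nat))) 0xFFFFFFFF
  let xor_result := PySem.Int.bxor expanded subkey
  let substituted := (PySem.List.pyRange 0 8 1).foldl (fun acc i =>
      let nibble := PySem.Int.band (xor_result >>> (i*4).toNat) 0xF
      let new_nibble := PySem.Int.band (PySem.Int.bxor (Int.not nibble) 0x5) 0xF
      PySem.Int.bor acc (new_nibble <<< (i*4).toNat)) 0
  PySem.Int.band (PySem.Int.bor (substituted <<< (7:Nat)) (substituted >>> (25:Nat))) 0xFFFFFFFF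

-- ===== PORT B =====
-- helper `rot` from Source B: ((x << l) | (x >> (32 - l))) & 0xFFFFFFFF
def pvRot (x : Int) (l : Nat) : Int :=
  PySem.Int.band (PySem.Int.bor (x <<< l) (x >>> (32 - l))) 0xFFFFFFFF

def f_function_py_alt (right_half : Int) (subkey : Int) : Int :=
  pvRot (PySem.Int.band (PySem.Int.bxor (PySem.Int.bxor (pvRot right_half 1) subkey) 0xAAAAAAAA) 0xFFFFFFFF) 7

-- ===== PRECONDITION & SPEC =====
def Spec_f_function_py (right_half : Int) (subkey : Int) (out : Int) : Prop := out = f_function_py_alt right_half subkey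
instance (right_half : Int) (subkey : Int) (out : Int) : Decidable (Spec_f_function_py right_half subkey out) := by unfold Spec_f_function_py; infer_instance

-- ===== CLAIM (what is proved, stated in full; the proofs are below) =====
def Claim_equal_f_function_py : Prop := ∀ (right_half : Int) (subkey : Int), Dom_f_function_py right_half subkey → Spec_f_function_py right_half subkey (f_function_py right_half subkey)

-- ===== LEMMAS AND PROOFS =====

lemma pvXorDiv2 (a b : Nat) : (a ^^^ b) / 2 = a / 2 ^^^ b / 2 := by
  have h : ∀ x : Nat, x / 2 = x >>> 1 := by
    intro x; rw [Nat.shiftRight_eq_div_pow, pow_one]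
  rw [h, h, h]
  apply Nat.eq_of_testBit_eq
  intro i
  simp [Nat.testBit_shiftRight, Nat.testBit_xor]

lemma pvSubXor : ∀ (n z : Nat), z < 2^n → (2^n - 1) - z = (2^n - 1) ^^^ z := by
  intro n
  induction n with
  | zero => intro z hz; interval_cases z; decide
  | succ n ih =>
    intro z hz
    have hp : 2^(n+1) = 2*2^n := by ring
    have hz2 : z / 2 < 2^n := by omega
    have ih' := ih (z/2) hz2
    have e1 : ((2^(n+1) - 1) ^^^ z) % 2 = ((2^(n+1) - 1) + z) % 2 := Nat.xor_mod_two_eq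
    have e2 : ((2^(n+1) - 1) ^^^ z) / 2 = (2^(n+1) - 1)/2 ^^^ z/2 := pvXorDiv2 _ _
    have e3 : (2^(n+1) - 1)/2 = 2^n - 1 := by omega
    rw [e3] at e2
    have hpos : 0 < 2^n := Nat.two_pow_pos n
    omega

lemma pvTb15 (i : Nat) : Nat.testBit 15 i = decide (i < 4) := by
  have h : (15:Nat) = 2^4 - 1 := by norm_num
  rw [h, Nat.testBit_two_pow_sub_one]

lemma pvTbM (i : Nat) : Nat.testBit 4294967295 i = decide (i < 32) := by
  have h : (4294967295:Nat) = 2^32 - 1 := by norm_num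
  rw [h, Nat.testBit_two_pow_sub_one]

lemma pvTb10 (i : Nat) : Nat.testBit 10 i = (decide (i = 1) || decide (i = 3)) := by
  rcases i with _|_|_|_|j
  · decide
  · decide
  · decide
  · decide
  · rw [Nat.testBit_lt_two_pow (by calc (10:Nat) < 2^4 := by norm_num
        _ ≤ 2^(j+4) := Nat.pow_le_pow_right (by norm_num) (by omega))]
    simp

lemma pvTb5 (i : Nat) : Nat.testBit 5 i = (decide (i = 0) || decide (i = 2)) := by
  rcases i with _|_|_|j
  · decide
  · decide
  · decide
  · rw [Nat.testBit_lt_two_pow (by calc (5:Nat) < 2^3 := by norm_num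
        _ ≤ 2^(j+3) := Nat.pow_le_pow_right (by norm_num) (by omega))]
    simp

lemma pvTbA (i : Nat) : Nat.testBit 2863311530 i = (decide (i % 2 = 1) && decide (i < 32)) := by
  by_cases h : i < 32
  · interval_cases i <;> decide
  · rw [Nat.testBit_lt_two_pow (by calc (2863311530:Nat) < 2^32 := by norm_num
        _ ≤ 2^i := Nat.pow_le_pow_right (by norm_num) (by omega))]
    simp [h]

lemma pvL1 (n : Nat) :
    ((((((((0 ||| ((((n >>> 0) &&& 15) ^^^ 10) <<< 0)) ||| ((((n >>> 4) &&& 15) ^^^ 10) <<< 4))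
      ||| ((((n >>> 8) &&& 15) ^^^ 10) <<< 8)) ||| ((((n >>> 12) &&& 15) ^^^ 10) <<< 12))
      ||| ((((n >>> 16) &&& 15) ^^^ 10) <<< 16)) ||| ((((n >>> 20) &&& 15) ^^^ 10) <<< 20))
      ||| ((((n >>> 24) &&& 15) ^^^ 10) <<< 24)) ||| ((((n >>> 28) &&& 15) ^^^ 10) <<< 28))
    = (n ^^^ 2863311530) &&& 4294967295 := by
  apply Nat.eq_of_testBit_eq
  intro i
  simp only [Nat.testBit_lor, Nat.testBit_shiftLeft, Nat.testBit_xor, Nat.testBit_and,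
    Nat.testBit_shiftRight, pvTb15, pvTb10, pvTbA, pvTbM, Nat.zero_testBit]
  by_cases hi : i < 32
  · interval_cases i <;> simp
  · simp [show ¬ (i < 4) by omega, show ¬ (i = 1) by omega, show ¬ (i = 3) by omega, show ¬ (i - 4 < 4) by omega, show ¬ (i - 4 = 1) by omega, show ¬ (i - 4 = 3) by omega, show ¬ (i - 8 < 4) by omega, show ¬ (i - 8 = 1) by omega, show ¬ (i - 8 = 3) by omega, show ¬ (i - 12 < 4) by omega, show ¬ (i - 12 = 1) by omega, show ¬ (i - 12 = 3) by omega, show ¬ (i - 16 < 4) by omega, show ¬ (i - 16 = 1) by omega, show ¬ (i - 16 = 3) by omega, show ¬ (i - 20 < 4) by omega, show ¬ (i - 20 = 1) by omega, show ¬ (i - 20 = 3) by omega, show ¬ (i - 24 < 4) by omega, show ¬ (i - 24 = 1) by omega, show ¬ (i - 24 = 3) by omega, show ¬ (i - 28 < 4) by omega, show ¬ (i - 28 = 1) by omega, show ¬ (i - 28 = 3) by omega]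
    exact fun _ => by omega

lemma pvL2 (m : Nat) :
    ((((((((0 ||| (((15 &&& (m >>> 0)) ^^^ 5) <<< 0)) ||| (((15 &&& (m >>> 4)) ^^^ 5) <<< 4))
      ||| (((15 &&& (m >>> 8)) ^^^ 5) <<< 8)) ||| (((15 &&& (m >>> 12)) ^^^ 5) <<< 12))
      ||| (((15 &&& (m >>> 16)) ^^^ 5) <<< 16)) ||| (((15 &&& (m >>> 20)) ^^^ 5) <<< 20))
      ||| (((15 &&& (m >>> 24)) ^^^ 5) <<< 24)) ||| (((15 &&& (m >>> 28)) ^^^ 5) <<< 28))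
    = 4294967295 - (4294967295 &&& (m ^^^ 2863311530)) := by
  have hM : (4294967295:Nat) = 2^32 - 1 := by norm_num
  conv_rhs => rw [Nat.and_comm]
  rw [hM, Nat.and_two_pow_sub_one_eq_mod, pvSubXor 32 _ (Nat.mod_lt _ (by norm_num))]
  apply Nat.eq_of_testBit_eq
  intro i
  simp only [Nat.testBit_lor, Nat.testBit_shiftLeft, Nat.testBit_xor, Nat.testBit_and,
    Nat.testBit_shiftRight, Nat.testBit_mod_two_pow, Nat.testBit_two_pow_sub_one,
    pvTb15, pvTb5, pvTbA, Nat.zero_testBit]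
  by_cases hi : i < 32
  · interval_cases i <;> simp
  · simp [show ¬ (i < 4) by omega, show ¬ (i = 0) by omega, show ¬ (i = 2) by omega, show ¬ (i - 4 < 4) by omega, show ¬ (i - 4 = 0) by omega, show ¬ (i - 4 = 2) by omega, show ¬ (i - 8 < 4) by omega, show ¬ (i - 8 = 0) by omega, show ¬ (i - 8 = 2) by omega, show ¬ (i - 12 < 4) by omega, show ¬ (i - 12 = 0) by omega, show ¬ (i - 12 = 2) by omega, show ¬ (i - 16 < 4) by omega, show ¬ (i - 16 = 0) by omega, show ¬ (i - 16 = 2) by omega, show ¬ (i - 20 < 4) by omega, show ¬ (i - 20 = 0) by omega, show ¬ (i - 20 = 2) by omega, show ¬ (i - 24 < 4) by omega, show ¬ (i - 24 = 0) by omega, show ¬ (i - 24 = 2) by omega, show ¬ (i - 28 < 4) by omega, show ¬ (i - 28 = 0) by omega, show ¬ (i - 28 = 2) by omega, hi]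

lemma pvNibPos (v : Nat) (hv : v < 16) :
    PySem.Int.band (PySem.Int.bxor (Int.not ((v:Nat):Int)) 5) 15 = (((v ^^^ 10 : Nat)):Int) := by
  interval_cases v <;> decide

lemma pvNibNeg (u : Nat) (hu : u < 16) :
    PySem.Int.band (PySem.Int.bxor (Int.not (((15 - u : Nat)):Int)) 5) 15 = (((u ^^^ 5 : Nat)):Int) := by
  interval_cases u <;> decide

lemma pvStepPos (n a k : Nat) :
    PySem.Int.bor (a:Int) ((PySem.Int.band (PySem.Int.bxor (Int.not (PySem.Int.band (((n:Nat):Int) >>> k) 15)) 5) 15) <<< k)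
      = ((a ||| ((((n >>> k) &&& 15) ^^^ 10) <<< k) : Nat) : Int) := by
  have h1 : PySem.Int.band (((n:Nat):Int) >>> k) 15 = (((n >>> k) &&& 15 : Nat) : Int) := by
    rw [← Int.natCast_shiftRight]
    have := PySem.Int.band_natCast (n >>> k) 15
    simpa using this
  rw [h1, pvNibPos _ (Nat.lt_succ_of_le Nat.and_le_right),
    ← Int.natCast_shiftLeft, PySem.Int.bor_natCast]

lemma pvStepNeg (m a k : Nat) :
    PySem.Int.bor (a:Int) ((PySem.Int.band (PySem.Int.bxor (Int.not (PySem.Int.band ((Int.negSucc m) >>> k) 15)) 5) 15) <<< k)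
      = ((a ||| (((15 &&& (m >>> k)) ^^^ 5) <<< k) : Nat) : Int) := by
  rw [Int.negSucc_shiftRight]
  have h1 : PySem.Int.band (Int.negSucc (m >>> k)) 15 = (((15 - (15 &&& (m >>> k)) : Nat)):Int) := by
    simp [PySem.Int.band, -Int.natCast_shiftRight]
  rw [h1, pvNibNeg _ (Nat.lt_succ_of_le Nat.and_le_left),
    ← Int.natCast_shiftLeft, PySem.Int.bor_natCast]

lemma pvKey (x : Int) :
    (PySem.List.pyRange 0 8 1).foldl (fun acc i =>
      let nibble := PySem.Int.band (x >>> (i*4).toNat) 0xF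
      let new_nibble := PySem.Int.band (PySem.Int.bxor (Int.not nibble) 0x5) 0xF
      PySem.Int.bor acc (new_nibble <<< (i*4).toNat)) 0
    = PySem.Int.band (PySem.Int.bxor x 0xAAAAAAAA) 0xFFFFFFFF := by
  have hr : PySem.List.pyRange 0 8 1 = [0,1,2,3,4,5,6,7] := by decide
  rw [hr]
  simp only [List.foldl]
  simp only [show ((((0:Int))*4).toNat) = 0 by decide, show ((((1:Int))*4).toNat) = 4 by decide, show ((((2:Int))*4).toNat) = 8 by decide, show ((((3:Int))*4).toNat) = 12 by decide, show ((((4:Int))*4).toNat) = 16 by decide, show ((((5:Int))*4).toNat) = 20 by decide, show ((((6:Int))*4).toNat) = 24 by decide, show ((((7:Int))*4).toNat) = 28 by decide]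
  simp only [Int.shiftRight_natCast_right, Int.shiftLeft_natCast_right]
  rw [show (0:Int) = ((0:Nat):Int) by norm_num]
  rcases Int.lt_or_le x 0 with hx | hx
  · obtain ⟨m, rfl⟩ := Int.eq_negSucc_of_lt_zero hx
    simp only [pvStepNeg]
    have hxr : PySem.Int.bxor (Int.negSucc m) 2863311530 = Int.negSucc (m ^^^ 2863311530) := by
      simp only [PySem.Int.bxor, if_neg (Int.not_le.mpr (Int.negSucc_lt_zero m)),
        if_pos (by norm_num : (0:Int) ≤ 2863311530)]
      have h9 : (-(Int.negSucc m) - 1).toNat = m := by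
        rw [Int.negSucc_eq]; omega
      rw [h9, show (2863311530:Int).toNat = 2863311530 from by decide, Int.negSucc_eq]
      ring
    have hb : PySem.Int.band (Int.negSucc (m ^^^ 2863311530)) 4294967295
        = (((4294967295 - (4294967295 &&& (m ^^^ 2863311530)) : Nat)):Int) := by
      simp [PySem.Int.band]
    rw [hxr, hb, Int.natCast_inj]
    exact pvL2 m
  · obtain ⟨n, rfl⟩ := Int.eq_ofNat_of_zero_le hx
    simp only [pvStepPos]
    have hxr : PySem.Int.bxor ((n:Nat):Int) 2863311530 = (((n ^^^ 2863311530 : Nat)):Int) := by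
      rw [show (2863311530:Int) = ((2863311530:Nat):Int) by norm_num, PySem.Int.bxor_natCast]
    have hb : PySem.Int.band (((n ^^^ 2863311530 : Nat)):Int) 4294967295
        = ((((n ^^^ 2863311530) &&& 4294967295 : Nat)):Int) := by
      rw [show (4294967295:Int) = ((4294967295:Nat):Int) by norm_num, PySem.Int.band_natCast]
    rw [hxr, hb, Int.natCast_inj]
    exact pvL1 n

-- ===== VERDICT (by name: the statement is the Claim_ definition above) =====
theorem f_function_py_spec : Claim_equal_f_function_py := by
  intro right_half subkey _
  unfold Spec_f_function_py f_function_py f_function_py_alt pvRot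
  simp only [pvKey]
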